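-- pv_equiv track=rewrite | github.com/pypi-data/pypi-mirror-401 | packages/bodo/bodo-2026.1-cp310-cp310-macosx_12_0_arm64.whl/bodo/transforms/table_column_del_pass.py | get_live_column_nums_block
-- ===== SOURCE A (Python) =====
-- def get_live_column_nums_block(block_lives, equiv_vars, table_key):
--     """Given a finalized live map for a block, computes the actual
--     column numbers that are used by the table. For efficiency this returns
--     two values, a sorted list of column numbers and a use_all flag.
--     If use_all=True the column numbers are garbage."""
--     total_used_columns, use_all, cannot_del_cols = block_lives.get(
--         table_key, (set(), False, False)
--     )
--     if use_all or cannot_del_cols: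
--         return set(), use_all, cannot_del_cols
--     aliases = equiv_vars[table_key]
--     for var_key in aliases:
--         new_columns, use_all, cannot_del_cols = block_lives.get(
--             var_key, (set(), False, False)
--         )
--         if use_all or cannot_del_cols:
--             return set(), use_all, cannot_del_cols
--         total_used_columns = total_used_columns | new_columns
--     return total_used_columns, False, False
-- ===== SOURCE B (Python) =====
-- def get_live_column_nums_block(block_lives, equiv_vars, table_key):
--     """Check the table_key entry's guard first (so a missing equiv_vars key
--     is never consulted when the guard fires, exactly as in A); then
--     materialize all alias entries up front and make two separate passes:
--     a first-guard scan, then a union fold."""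
--     cols0, use_all, cannot_del_cols = block_lives.get(
--         table_key, (set(), False, False)
--     )
--     if use_all or cannot_del_cols:
--         return set(), use_all, cannot_del_cols
--     entries = [block_lives.get(k, (set(), False, False)) for k in equiv_vars[table_key]]
--     for _, u, c in entries:
--         if u or c:
--             return set(), u, c
--     total = set(cols0)
--     for cs, _, _ in entries:
--         total |= cs
--     return total, False, False
-- ===== Notes on version B (the rewrite author's own statement) =====
-- stated objective: alternative
-- what changed: B keeps A's initial table_key guard, but replaces A's single interleaved lookup/guard/union loop over the aliases with a pre-materialized entry list scanned by two separate passes (a first-guard scan, then a union fold).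
import Mathlib
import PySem

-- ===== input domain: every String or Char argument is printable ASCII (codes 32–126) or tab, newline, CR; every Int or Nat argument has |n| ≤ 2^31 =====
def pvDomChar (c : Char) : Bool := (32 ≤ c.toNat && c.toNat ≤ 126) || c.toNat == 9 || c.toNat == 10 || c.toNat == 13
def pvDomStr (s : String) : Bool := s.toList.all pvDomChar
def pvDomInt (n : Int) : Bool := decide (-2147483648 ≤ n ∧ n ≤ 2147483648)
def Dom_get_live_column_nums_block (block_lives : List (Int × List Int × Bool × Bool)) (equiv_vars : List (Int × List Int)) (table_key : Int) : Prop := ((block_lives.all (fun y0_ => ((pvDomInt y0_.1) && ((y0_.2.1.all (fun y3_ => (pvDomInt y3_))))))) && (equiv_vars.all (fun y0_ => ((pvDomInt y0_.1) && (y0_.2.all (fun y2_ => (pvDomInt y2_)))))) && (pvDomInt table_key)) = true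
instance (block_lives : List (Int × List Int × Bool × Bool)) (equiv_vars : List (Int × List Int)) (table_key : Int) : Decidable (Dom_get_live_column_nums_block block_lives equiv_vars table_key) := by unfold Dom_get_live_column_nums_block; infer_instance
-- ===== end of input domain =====

-- B keeps A's initial table_key guard but re-decomposes A's interleaved lookup/guard/union
-- alias loop into a pre-materialized entry list scanned by two separate passes; same cost.

-- ===== PORT A =====
-- the 'for var_key in aliases' loop of A, with early return on a guard
def pvALoop (block_lives : List (Int × List Int × Bool × Bool)) :
    List Int → List Int → List Int × Bool × Bool
  | total, [] => (total, false, false)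
  | total, var_key :: rest =>
    let e := (PySem.Dict.mk block_lives).getD var_key ([], false, false)
    if e.2.1 || e.2.2 then ([], e.2.1, e.2.2)
    else pvALoop block_lives (PySem.Set.union total e.1) rest

def get_live_column_nums_block (block_lives : List (Int × List Int × Bool × Bool)) (equiv_vars : List (Int × List Int)) (table_key : Int) : List Int × Bool × Bool :=
  let e := (PySem.Dict.mk block_lives).getD table_key ([], false, false)
  if e.2.1 || e.2.2 then ([], e.2.1, e.2.2)
  else
    match (PySem.Dict.mk equiv_vars).get? table_key with
    | none => ([], false, false)  -- equiv_vars[table_key] raises KeyError: excluded by Pre_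
    | some aliases => pvALoop block_lives e.1 aliases

-- ===== PORT B =====
def get_live_column_nums_block_alt (block_lives : List (Int × List Int × Bool × Bool)) (equiv_vars : List (Int × List Int)) (table_key : Int) : List Int × Bool × Bool :=
  let e := (PySem.Dict.mk block_lives).getD table_key ([], false, false)
  if e.2.1 || e.2.2 then ([], e.2.1, e.2.2)
  else
    match (PySem.Dict.mk equiv_vars).get? table_key with
    | none => ([], false, false)  -- equiv_vars[table_key] raises KeyError: excluded by Pre_
    | some aliases =>
      let entries := aliases.map (fun k => (PySem.Dict.mk block_lives).getD k ([], false, false))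
      match entries.find? (fun g => g.2.1 || g.2.2) with
      | some g => ([], g.2.1, g.2.2)
      | none => (entries.foldl (fun total g => PySem.Set.union total g.1) (PySem.Set.ofList e.1), false, false)

-- ===== PRECONDITION & SPEC =====
-- Pre_ excludes only inputs where table_key is absent from equiv_vars while the table_key
-- guard is off: there equiv_vars[table_key] raises KeyError (in both A and B); the Nodup
-- conjunct only states each cols list encodes a Python set (distinct elements), which every
-- Python-representable input satisfies.
def Pre_get_live_column_nums_block (block_lives : List (Int × List Int × Bool × Bool)) (equiv_vars : List (Int × List Int)) (table_key : Int) : Prop :=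
  (table_key ∈ equiv_vars.map Prod.fst ∨
    (((PySem.Dict.mk block_lives).getD table_key ([], false, false)).2.1 ||
     ((PySem.Dict.mk block_lives).getD table_key ([], false, false)).2.2) = true) ∧
  ∀ p ∈ block_lives, p.2.1.Nodup
instance (block_lives : List (Int × List Int × Bool × Bool)) (equiv_vars : List (Int × List Int)) (table_key : Int) : Decidable (Pre_get_live_column_nums_block block_lives equiv_vars table_key) := by unfold Pre_get_live_column_nums_block; infer_instance

def pvWitness_get_live_column_nums_block : (List (Int × List Int × Bool × Bool)) × (List (Int × List Int)) × Int :=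
  ([((0 : Int), ([1, 2] : List Int), false, false), ((1 : Int), ([2, 3] : List Int), false, false)],
   [((0 : Int), ([1] : List Int))], (0 : Int))

def Spec_get_live_column_nums_block (block_lives : List (Int × List Int × Bool × Bool)) (equiv_vars : List (Int × List Int)) (table_key : Int) (out : List Int × Bool × Bool) : Prop := out = get_live_column_nums_block_alt block_lives equiv_vars table_key
instance (block_lives : List (Int × List Int × Bool × Bool)) (equiv_vars : List (Int × List Int)) (table_key : Int) (out : List Int × Bool × Bool) : Decidable (Spec_get_live_column_nums_block block_lives equiv_vars table_key out) := by unfold Spec_get_live_column_nums_block; infer_instance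

-- ===== CLAIM (what is proved, stated in full; the proofs are below) =====
def Claim_equal_get_live_column_nums_block : Prop := ∀ (block_lives : List (Int × List Int × Bool × Bool)) (equiv_vars : List (Int × List Int)) (table_key : Int), Dom_get_live_column_nums_block block_lives equiv_vars table_key → Pre_get_live_column_nums_block block_lives equiv_vars table_key → Spec_get_live_column_nums_block block_lives equiv_vars table_key (get_live_column_nums_block block_lives equiv_vars table_key)

-- ===== LEMMAS AND PROOFS =====

-- every entry produced by block_lives.get(k, (set(), False, False)) has a duplicate-free cols list
theorem pv_nodup_getD (block_lives : List (Int × List Int × Bool × Bool))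
    (h : ∀ p ∈ block_lives, p.2.1.Nodup) (k : Int) :
    ((PySem.Dict.mk block_lives).getD k ([], false, false)).1.Nodup := by
  simp only [PySem.Dict.getD, PySem.Dict.get?]
  cases hf : List.find? (fun p => p.1 == k) block_lives with
  | none => simp
  | some p =>
    have hp := List.mem_of_find?_eq_some hf
    simpa using h p hp

-- A's loop equals B's two passes over the mapped entry list, for any accumulator
theorem pv_loop_eq (block_lives : List (Int × List Int × Bool × Bool)) (aliases : List Int) :
    ∀ total : List Int,
    pvALoop block_lives total aliases =
      match (aliases.map (fun k => (PySem.Dict.mk block_lives).getD k ([], false, false))).find?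
              (fun g => g.2.1 || g.2.2) with
      | some g => ([], g.2.1, g.2.2)
      | none =>
        ((aliases.map (fun k => (PySem.Dict.mk block_lives).getD k ([], false, false))).foldl
            (fun total g => PySem.Set.union total g.1) total, false, false) := by
  induction aliases with
  | nil => intro total; simp [pvALoop]
  | cons k rest ih =>
    intro total
    simp only [pvALoop, List.map_cons, List.find?_cons, List.foldl_cons]
    by_cases hg : (((PySem.Dict.mk block_lives).getD k ([], false, false)).2.1 ||
                   ((PySem.Dict.mk block_lives).getD k ([], false, false)).2.2) = true
    · simp [hg]
    · simp only [Bool.not_eq_true] at hg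
      simp [hg, ih]

-- ===== VERDICT (by name: the statement is the Claim_ definition above) =====
theorem get_live_column_nums_block_spec : Claim_equal_get_live_column_nums_block := by
  intro block_lives equiv_vars table_key _ hpre
  obtain ⟨_, hnd⟩ := hpre
  unfold Spec_get_live_column_nums_block
  unfold get_live_column_nums_block get_live_column_nums_block_alt
  by_cases hg : (((PySem.Dict.mk block_lives).getD table_key ([], false, false)).2.1 ||
                 ((PySem.Dict.mk block_lives).getD table_key ([], false, false)).2.2) = true
  · simp [hg]
  · simp only [Bool.not_eq_true] at hg
    cases hev : (PySem.Dict.mk equiv_vars).get? table_key with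
    | none => simp [hg, hev]
    | some aliases =>
      have hn : ((PySem.Dict.mk block_lives).getD table_key ([], false, false)).1.Nodup :=
        pv_nodup_getD block_lives hnd table_key
      have ho : PySem.Set.ofList ((PySem.Dict.mk block_lives).getD table_key ([], false, false)).1 =
          ((PySem.Dict.mk block_lives).getD table_key ([], false, false)).1 :=
        PySem.Set.ofList_eq_self_of_nodup _ hn
      simp only [hg, Bool.false_eq_true, if_false, hev, pv_loop_eq, ho]
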